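-- pv_equiv track=rewrite | github.com/ironhouzi/pytib | pytib/core.py | generate_stacks
-- ===== SOURCE A (Python) =====
-- import itertools
--
-- def generate_stacks(latin_letters, table):
--     ''' Group letters into stacks, represented by a list '''
--
--     stack = []
--     prev, curr = itertools.tee(latin_letters)
--     curr_char = next(curr, None)
--
--     for prev_char, curr_char in zip(prev, curr):
--         stack.append(prev_char)
--         prev_match = prev_char in table['SW_VOWELS']
--         curr_match = curr_char in table['SW_VOWELS']
--
--         if prev_match == curr_match:
--             continue
--
--         if prev_match:
--             yield stack
--             stack = []
--
--     if curr_char: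
--         stack.append(curr_char)
--         yield stack
-- ===== SOURCE B (Python) =====
-- def generate_stacks(latin_letters, table):
--     ''' Group letters into stacks, represented by a list '''
--     chars = list(latin_letters)
--     if not chars:
--         return
--     vowels = table['SW_VOWELS']
--     n = len(chars)
--     bounds = [0] + [i + 1 for i in range(n - 1)
--                     if chars[i] in vowels and chars[i + 1] not in vowels] + [n]
--     for a, b in zip(bounds, bounds[1:]):
--         yield chars[a:b]
-- ===== Notes on version B (the rewrite author's own statement) =====
-- stated objective: alternative
-- what changed: B replaces A's tee/zip pairwise scan with a mutable stack accumulator by computing all cut indices in one comprehension and slicing the list into the groups between consecutive bounds; Pre_ excludes nonempty inputs whose table lacks 'SW_VOWELS', where A raises KeyError for length >= 2 and B, fetching the vowel list up front, raises KeyError even on the length-1 inputs A returns on before the lookup.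
-- intended difference: On nonempty inputs whose last element is the empty string, A's `if curr_char:` truthiness test silently drops the whole final group, while B yields it like any other group, which is intended since grouping should not discard letters. — e.g. on generate_stacks(["b", ""], [("SW_VOWELS", ["a"])]): A returns [], B returns [["b", ""]]
-- outside the precondition, e.g. on generate_stacks(['a'], {}): A returns [['a']], B raises KeyError
import Mathlib
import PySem

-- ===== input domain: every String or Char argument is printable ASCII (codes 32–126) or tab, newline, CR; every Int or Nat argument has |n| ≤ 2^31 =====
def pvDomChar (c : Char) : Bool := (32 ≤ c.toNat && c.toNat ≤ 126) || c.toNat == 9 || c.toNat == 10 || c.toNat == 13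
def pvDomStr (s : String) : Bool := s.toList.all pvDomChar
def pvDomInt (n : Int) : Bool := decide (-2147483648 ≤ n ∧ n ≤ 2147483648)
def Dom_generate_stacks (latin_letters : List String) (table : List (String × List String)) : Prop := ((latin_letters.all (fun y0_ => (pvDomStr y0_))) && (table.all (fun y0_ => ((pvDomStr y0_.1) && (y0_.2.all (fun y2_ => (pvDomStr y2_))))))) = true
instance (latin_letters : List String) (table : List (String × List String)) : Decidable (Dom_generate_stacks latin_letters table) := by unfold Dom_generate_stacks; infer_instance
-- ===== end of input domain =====

-- B groups the letters by slicing at precomputed cut indices instead of A's pairwise tee/zip scan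
-- with a mutable stack (alternative decomposition, same cost; return-value equivalence only —
-- both Pythons are generators and consume the iterable); when the last letter is the empty
-- string A drops the final group and B keeps it (intended difference, see D_ below).

-- ===== PORT A =====
-- one iteration of A's `for prev_char, curr_char in zip(prev, curr)` loop body;
-- state = (yielded groups so far, current stack)
def stepA (sw : List String) (acc : List (List String) × List String) (p : String × String) :
    List (List String) × List String :=
  let stack := acc.2 ++ [p.1]
  let prev_match := sw.contains p.1
  let curr_match := sw.contains p.2
  if prev_match = curr_match then (acc.1, stack)
  else if prev_match then (acc.1 ++ [stack], [])
  else (acc.1, stack)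

def generate_stacks (latin_letters : List String) (table : List (String × List String)) : List (List String) :=
  -- table['SW_VOWELS'] (looked up only while the zip is nonempty; Pre_ guarantees the key then)
  let sw := (PySem.Dict.mk table).getD "SW_VOWELS" []
  -- zip(prev, curr) of tee(latin_letters) after next(curr, None) = adjacent pairs
  let r := (latin_letters.zip latin_letters.tail).foldl (stepA sw) ([], [])
  -- curr_char after the loop is the last element (None if input empty); `if curr_char:`
  match latin_letters.getLast? with
  | none => r.1
  | some c => if c ≠ "" then r.1 ++ [r.2 ++ [c]] else r.1

-- ===== PORT B =====
-- the cut-index comprehension [i+1 for i in range(n-1) if chars[i] in vowels and chars[i+1] not in vowels]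
def cutsB (sw : List String) (chars : List String) : List Nat :=
  (List.range (chars.length - 1)).filterMap (fun i =>
    if sw.contains (chars.getD i "") = true ∧ sw.contains (chars.getD (i + 1) "") = false
    then some (i + 1) else none)

-- chars[a:b] for 0 ≤ a ≤ b ≤ n
def sliceB (chars : List String) (p : Nat × Nat) : List String :=
  (chars.drop p.1).take (p.2 - p.1)

-- the groups chars[a:b] for a, b in zip(bounds, bounds[1:]) with bounds = [0] + cuts + [n]
def groupsB (sw : List String) (chars : List String) : List (List String) :=
  let bounds := 0 :: (cutsB sw chars ++ [chars.length])
  (bounds.zip bounds.tail).map (sliceB chars)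

def generate_stacks_alt (latin_letters : List String) (table : List (String × List String)) : List (List String) :=
  match latin_letters with
  | [] => []
  | _ :: _ =>
    let sw := (PySem.Dict.mk table).getD "SW_VOWELS" []
    groupsB sw latin_letters

-- ===== PRECONDITION & SPEC =====
-- Pre_ excludes nonempty inputs whose table lacks the 'SW_VOWELS' key: A raises KeyError there
-- for every input of length ≥ 2, and B, which fetches the vowel list before grouping, itself
-- raises KeyError on the length-1 inputs where A happens to return before the lookup.
def Pre_generate_stacks (latin_letters : List String) (table : List (String × List String)) : Prop :=
  latin_letters = [] ∨ (PySem.Dict.mk table).get? "SW_VOWELS" ≠ none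

instance (latin_letters : List String) (table : List (String × List String)) :
    Decidable (Pre_generate_stacks latin_letters table) := by
  unfold Pre_generate_stacks; infer_instance

def pvWitness_generate_stacks : List String × (List (String × List String)) :=
  (["b", "a", "c"], [("SW_VOWELS", ["a", "e"])])

-- On nonempty inputs whose last element is the empty string, A's `if curr_char:` truthiness
-- test silently drops the whole final group, while B yields it like any other group, which is
-- intended since grouping should not discard letters.
def D_generate_stacks (latin_letters : List String) (table : List (String × List String)) : Prop :=
  latin_letters.getLast? = some ""

instance (latin_letters : List String) (table : List (String × List String)) :
    Decidable (D_generate_stacks latin_letters table) := by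
  unfold D_generate_stacks; infer_instance

def Spec_generate_stacks (latin_letters : List String) (table : List (String × List String)) (out : List (List String)) : Prop := ¬ D_generate_stacks latin_letters table → out = generate_stacks_alt latin_letters table
instance (latin_letters : List String) (table : List (String × List String)) (out : List (List String)) : Decidable (Spec_generate_stacks latin_letters table out) := by unfold Spec_generate_stacks; infer_instance

def pvDiffWitness_generate_stacks : List String × (List (String × List String)) :=
  (["b", ""], [("SW_VOWELS", ["a"])])

def pvDiffWitnessOut_generate_stacks : (List (List String)) × (List (List String)) :=
  ([], [["b", ""]])

-- ===== CLAIM (what is proved, stated in full; the proofs are below) =====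
def Claim_unchanged_generate_stacks : Prop := ∀ (latin_letters : List String) (table : List (String × List String)), Dom_generate_stacks latin_letters table → Pre_generate_stacks latin_letters table → Spec_generate_stacks latin_letters table (generate_stacks latin_letters table)
def Claim_changed_generate_stacks : Prop := Dom_generate_stacks (pvDiffWitness_generate_stacks.1) (pvDiffWitness_generate_stacks.2) ∧ Pre_generate_stacks (pvDiffWitness_generate_stacks.1) (pvDiffWitness_generate_stacks.2) ∧ D_generate_stacks (pvDiffWitness_generate_stacks.1) (pvDiffWitness_generate_stacks.2) ∧ generate_stacks (pvDiffWitness_generate_stacks.1) (pvDiffWitness_generate_stacks.2) = pvDiffWitnessOut_generate_stacks.1 ∧ generate_stacks_alt (pvDiffWitness_generate_stacks.1) (pvDiffWitness_generate_stacks.2) = pvDiffWitnessOut_generate_stacks.2 ∧ pvDiffWitnessOut_generate_stacks.1 ≠ pvDiffWitnessOut_generate_stacks.2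
def Claim_exact_generate_stacks : Prop := ∀ (latin_letters : List String) (table : List (String × List String)), Dom_generate_stacks latin_letters table → Pre_generate_stacks latin_letters table → D_generate_stacks latin_letters table → generate_stacks latin_letters table ≠ generate_stacks_alt latin_letters table

-- ===== LEMMAS AND PROOFS =====

-- reference grouping: cut between x and y exactly when x is a vowel and y is not
def chop (sw : List String) : List String → List (List String)
  | [] => []
  | [x] => [[x]]
  | x :: y :: t =>
    if sw.contains x = true ∧ sw.contains y = false then [x] :: chop sw (y :: t)
    else
      match chop sw (y :: t) with
      | [] => [[x]]
      | g :: gs => (x :: g) :: gs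

theorem stepA_eq (sw : List String) (o : List (List String)) (s : List String)
    (p : String × String) :
    stepA sw (o, s) p =
      if sw.contains p.1 = true ∧ sw.contains p.2 = false then (o ++ [s ++ [p.1]], [])
      else (o, s ++ [p.1]) := by
  cases hx : sw.contains p.1 <;> cases hy : sw.contains p.2 <;>
    simp only [stepA, hx, hy] <;> simp

theorem chop_ne_nil (sw : List String) (x : String) (t : List String) :
    chop sw (x :: t) ≠ [] := by
  cases t with
  | nil => simp [chop]
  | cons y t =>
    simp only [chop]
    split
    · simp
    · split <;> simp

theorem chop_groups_ne_nil (sw : List String) (l : List String) :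
    ∀ g ∈ chop sw l, g ≠ [] := by
  induction l with
  | nil => simp [chop]
  | cons x t ih =>
    cases t with
    | nil => simp [chop]
    | cons y t =>
      simp only [chop]
      split
      · intro g hg
        rcases List.mem_cons.1 hg with h | h
        · simp [h]
        · exact ih g h
      · rcases hc : chop sw (y :: t) with _ | ⟨g0, gs⟩
        · simp
        · intro g hg
          rcases List.mem_cons.1 hg with h | h
          · simp [h]
          · exact ih g (by rw [hc]; exact List.mem_cons_of_mem _ h)

-- last element of the last chop group is the last element of the list
theorem chop_last_last (sw : List String) (x : String) (t : List String) :
    (((chop sw (x :: t)).getLast?).getD []).getLast? = (x :: t).getLast? := by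
  induction t generalizing x with
  | nil => simp [chop]
  | cons y t ih =>
    simp only [chop]
    split
    · rcases hc : chop sw (y :: t) with _ | ⟨g0, gs⟩
      · exact absurd hc (chop_ne_nil sw y t)
      · have := ih y; rw [hc] at this
        rw [List.getLast?_cons_cons, this, List.getLast?_cons_cons]
    · rcases hc : chop sw (y :: t) with _ | ⟨g0, gs⟩
      · exact absurd hc (chop_ne_nil sw y t)
      · cases gs with
        | nil =>
          have := ih y; rw [hc] at this
          simp only [List.getLast?_singleton, Option.getD_some] at this ⊢
          have hg0 : g0 ≠ [] := chop_groups_ne_nil sw (y :: t) g0 (by rw [hc]; simp)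
          rcases hg : g0 with _ | ⟨a, g0'⟩
          · exact absurd hg hg0
          · subst hg
            rw [List.getLast?_cons_cons, this]
            exact (List.getLast?_cons_cons).symm
        | cons g1 gs =>
          have := ih y; rw [hc] at this
          rw [List.getLast?_cons_cons] at this ⊢
          rw [this, List.getLast?_cons_cons]

-- prepend s onto the first group (A's pending stack merges into the first yielded group)
def prependFirst (s : List String) : List (List String) → List (List String)
  | [] => []
  | g :: gs => (s ++ g) :: gs

-- A's fold from an arbitrary state (out, stack) in terms of the fold from ([], [])
theorem foldA_shift (sw : List String) (ps : List (String × String))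
    (out : List (List String)) (stack : List String) :
    ps.foldl (stepA sw) (out, stack) =
      (out ++ prependFirst stack (ps.foldl (stepA sw) ([], [])).1,
       if (ps.foldl (stepA sw) ([], [])).1 = [] then
         stack ++ (ps.foldl (stepA sw) ([], [])).2
       else (ps.foldl (stepA sw) ([], [])).2) := by
  induction ps generalizing out stack with
  | nil => simp [prependFirst]
  | cons p ps ih =>
    simp only [List.foldl_cons, stepA_eq]
    by_cases hcut : sw.contains p.1 = true ∧ sw.contains p.2 = false
    · rw [if_pos hcut, if_pos hcut]
      rw [ih (out ++ [stack ++ [p.1]]) [], ih ([] ++ [[] ++ [p.1]]) []]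
      rcases h1 : (ps.foldl (stepA sw) ([], [])).1 with _ | ⟨o0, os⟩ <;>
        simp [prependFirst]
    · rw [if_neg hcut, if_neg hcut]
      rw [ih out (stack ++ [p.1]), ih [] ([] ++ [p.1])]
      rcases h1 : (ps.foldl (stepA sw) ([], [])).1 with _ | ⟨o0, os⟩ <;>
        simp [prependFirst]

-- A's fold over the adjacent pairs of a nonempty list, characterized through chop
theorem foldA_chop (sw : List String) (x : String) (t : List String) :
    ((x :: t).zip (x :: t).tail).foldl (stepA sw) ([], []) =
      ((chop sw (x :: t)).dropLast,
       (((chop sw (x :: t)).getLast?).getD []).dropLast) := by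
  induction t generalizing x with
  | nil => simp [chop]
  | cons y t ih =>
    have hpair : ((x :: y :: t).zip (x :: y :: t).tail) =
        (x, y) :: ((y :: t).zip (y :: t).tail) := by simp
    rw [hpair, List.foldl_cons, stepA_eq]
    by_cases hcut : sw.contains x = true ∧ sw.contains y = false
    · rw [if_pos hcut, foldA_shift, ih y]
      simp only [chop, if_pos hcut]
      rcases hc : chop sw (y :: t) with _ | ⟨g0, gs⟩
      · exact absurd hc (chop_ne_nil sw y t)
      · cases gs with
        | nil => simp [prependFirst]
        | cons g1 gs => simp [prependFirst]
    · rw [if_neg hcut, foldA_shift, ih y]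
      simp only [chop, if_neg hcut]
      rcases hc : chop sw (y :: t) with _ | ⟨g0, gs⟩
      · exact absurd hc (chop_ne_nil sw y t)
      · have hg0 : g0 ≠ [] := chop_groups_ne_nil sw (y :: t) g0 (by rw [hc]; simp)
        cases gs with
        | nil =>
          simp only [List.dropLast_singleton, prependFirst, List.getLast?_singleton,
            Option.getD_some]
          simp [List.dropLast_cons_of_ne_nil hg0]
        | cons g1 gs =>
          simp [prependFirst]

-- cuts of x :: y :: t in terms of cuts of y :: t
theorem cutsB_cons_cons (sw : List String) (x y : String) (t : List String) :
    cutsB sw (x :: y :: t) =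
      (if sw.contains x = true ∧ sw.contains y = false then [1] else []) ++
        (cutsB sw (y :: t)).map (· + 1) := by
  have hfe : ((fun i =>
        if sw.contains ((x :: y :: t).getD i "") = true ∧
            sw.contains ((x :: y :: t).getD (i + 1) "") = false
        then some (i + 1) else none) : Nat → Option Nat) ∘ Nat.succ =
      fun i => Option.map (· + 1)
        (if sw.contains ((y :: t).getD i "") = true ∧
            sw.contains ((y :: t).getD (i + 1) "") = false
         then some (i + 1) else none) := by
    funext i
    simp only [Function.comp, Nat.succ_eq_add_one, List.getD_cons_succ]
    split <;> rfl
  simp only [cutsB, List.length_cons, Nat.add_sub_cancel]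
  rw [List.range_succ_eq_map, List.filterMap_cons, List.filterMap_map, hfe,
    ← List.map_filterMap]
  simp only [List.getD_cons_zero, List.getD_cons_succ]
  by_cases hcut : sw.contains x = true ∧ sw.contains y = false
  · rw [if_pos hcut, if_pos hcut]; rfl
  · rw [if_neg hcut, if_neg hcut]; rfl

theorem map_slice_zip_shift (c : String) (l : List String) (b0 : Nat) (bs : List Nat) :
    ((((b0 :: bs).map (· + 1)).zip (bs.map (· + 1))).map (sliceB (c :: l))) =
      ((b0 :: bs).zip bs).map (sliceB l) := by
  rw [List.zip_map, List.map_map]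
  congr 1
  funext p
  rcases p with ⟨a, b⟩
  simp [sliceB, Nat.succ_sub_succ]

theorem groupsB_eq_chop (sw : List String) (x : String) (t : List String) :
    groupsB sw (x :: t) = chop sw (x :: t) := by
  induction t generalizing x with
  | nil => simp [groupsB, cutsB, chop, sliceB]
  | cons y t ih =>
    simp only [groupsB, List.length_cons, cutsB_cons_cons]
    by_cases hcut : sw.contains x = true ∧ sw.contains y = false
    · rw [if_pos hcut]
      have h1 : (0 : Nat) :: (([1] ++ (cutsB sw (y :: t)).map (· + 1)) ++ [t.length + 1 + 1]) =
          0 :: 1 :: (cutsB sw (y :: t) ++ [t.length + 1]).map (· + 1) := by simp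
      rw [h1]
      simp only [List.tail_cons]
      rw [List.zip_cons_cons, List.map_cons]
      have h2 : sliceB (x :: y :: t) (0, 1) = [x] := by simp [sliceB]
      have h3 : (1 : Nat) :: (cutsB sw (y :: t) ++ [t.length + 1]).map (· + 1) =
          (0 :: (cutsB sw (y :: t) ++ [t.length + 1])).map (· + 1) := by simp
      rw [h2, h3, map_slice_zip_shift]
      have h4 : ((0 :: (cutsB sw (y :: t) ++ [t.length + 1])).zip
            (cutsB sw (y :: t) ++ [t.length + 1])).map (sliceB (y :: t)) =
          groupsB sw (y :: t) := by simp [groupsB]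
      rw [h4, ih]
      conv_rhs => rw [chop]
      rw [if_pos hcut]
    · rw [if_neg hcut]
      rcases hB : cutsB sw (y :: t) ++ [t.length + 1] with _ | ⟨b0, R⟩
      · simp at hB
      · have h1 : (0 : Nat) :: (List.nil ++ (cutsB sw (y :: t)).map (· + 1) ++ [t.length + 1 + 1]) =
            0 :: (b0 + 1) :: R.map (· + 1) := by
          have hmap : (cutsB sw (y :: t)).map (· + 1) ++ [t.length + 1 + 1] =
              (cutsB sw (y :: t) ++ [t.length + 1]).map (· + 1) := by simp
          simp only [List.nil_append, hmap, hB, List.map_cons]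
        rw [h1]
        simp only [List.tail_cons]
        rw [List.zip_cons_cons, List.map_cons]
        have h3 : (b0 + 1) :: R.map (· + 1) = (b0 :: R).map (· + 1) := by simp
        rw [h3, map_slice_zip_shift]
        have hg : groupsB sw (y :: t) =
            sliceB (y :: t) (0, b0) :: ((b0 :: R).zip R).map (sliceB (y :: t)) := by
          simp [groupsB, hB]
        rcases hc : chop sw (y :: t) with _ | ⟨g, gs⟩
        · exact absurd hc (chop_ne_nil sw y t)
        · have hih := ih y
          rw [hg, hc] at hih
          simp only [List.cons.injEq] at hih
          obtain ⟨hgeq, hgs⟩ := hih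
          have hhead : sliceB (x :: y :: t) (0, b0 + 1) = x :: sliceB (y :: t) (0, b0) := by
            simp [sliceB]
          rw [hhead, hgeq, hgs]
          conv_rhs => rw [chop]
          rw [if_neg hcut, hc]

-- ===== VERDICT (by name: the statements are the Claim_ definitions above) =====
theorem generate_stacks_spec : Claim_unchanged_generate_stacks := by
  intro latin_letters table _ _ hD
  cases latin_letters with
  | nil => rfl
  | cons x t =>
    simp only [generate_stacks, generate_stacks_alt]
    rw [foldA_chop, groupsB_eq_chop]
    rcases hlast : (x :: t).getLast? with _ | c
    · simp at hlast
    · have hc : c ≠ "" := by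
        intro h; exact hD (by unfold D_generate_stacks; rw [hlast, h])
      have hlg : (((chop ((PySem.Dict.mk table).getD "SW_VOWELS" []) (x :: t)).getLast?).getD
          []).getLast? = some c := by
        rw [chop_last_last, hlast]
      have hGne := chop_ne_nil ((PySem.Dict.mk table).getD "SW_VOWELS" []) x t
      rcases hG : (chop ((PySem.Dict.mk table).getD "SW_VOWELS" []) (x :: t)).getLast?
          with _ | lg
      · rw [List.getLast?_eq_none_iff] at hG
        exact absurd hG hGne
      · have hlg2 : lg.getLast? = some c := by rw [hG] at hlg; simpa using hlg
        have h5 : lg.dropLast ++ [c] = lg := List.dropLast_append_getLast? c hlg2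
        have h6 : (chop ((PySem.Dict.mk table).getD "SW_VOWELS" []) (x :: t)).dropLast ++ [lg] =
            chop ((PySem.Dict.mk table).getD "SW_VOWELS" []) (x :: t) :=
          List.dropLast_append_getLast? lg hG
        simp only [Option.getD_some]
        rw [if_pos hc, h5, h6]

theorem generate_stacks_changed : Claim_changed_generate_stacks := by
  unfold Claim_changed_generate_stacks; decide

theorem generate_stacks_tight : Claim_exact_generate_stacks := by
  intro latin_letters table _ _ hD
  unfold D_generate_stacks at hD
  cases latin_letters with
  | nil => simp at hD
  | cons x t =>
    simp only [generate_stacks, generate_stacks_alt]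
    rw [foldA_chop, groupsB_eq_chop, hD]
    simp only [ne_eq, not_true_eq_false, if_false]
    intro h
    have hGne := chop_ne_nil ((PySem.Dict.mk table).getD "SW_VOWELS" []) x t
    have hlen := congrArg List.length h
    rw [List.length_dropLast] at hlen
    have hpos : 0 < (chop ((PySem.Dict.mk table).getD "SW_VOWELS" []) (x :: t)).length :=
      List.length_pos_of_ne_nil hGne
    omega
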